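-- pv_equiv track=rewrite | github.com/nikaasanashvili/GOA-homeworks40-2- | level_018/homework/hw7.py | sashvalo
-- ===== SOURCE A (Python) =====
-- def sashvalo(namber):
--     sum=0
--     index=0
--     for i in range(0, len(namber)+1):
--         if i % 2 == 0:
--             sum += i
--             index += 1
--     return sum // index
-- ===== SOURCE B (Python) =====
-- def sashvalo(namber):
--     # Closed form: A sums the even numbers in 0..len and divides by their
--     # count; that quotient is exactly len(namber) // 2.
--     return len(namber) // 2
-- ===== Notes on version B (the rewrite author's own statement) =====
-- stated objective: faster
-- what changed: Replaced the O(n) loop summing even indices 0..len and counting them with the closed form len(namber)//2 (sum of evens 0..n is k(k+1) with k=n//2, count is k+1, quotient k).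
import Mathlib
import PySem

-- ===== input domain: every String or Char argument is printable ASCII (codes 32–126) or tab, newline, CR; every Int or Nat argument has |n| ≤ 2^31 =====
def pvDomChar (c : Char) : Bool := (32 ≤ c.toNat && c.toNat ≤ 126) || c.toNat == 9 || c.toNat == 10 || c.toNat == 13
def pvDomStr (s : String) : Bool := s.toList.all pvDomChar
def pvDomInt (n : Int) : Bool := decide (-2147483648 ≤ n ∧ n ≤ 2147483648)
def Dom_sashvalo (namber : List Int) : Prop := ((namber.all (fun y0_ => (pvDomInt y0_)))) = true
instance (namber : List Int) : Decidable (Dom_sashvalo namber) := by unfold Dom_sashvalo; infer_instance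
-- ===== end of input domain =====

-- B replaces A's O(n) loop (sum of even indices 0..len divided by their count) with the
-- closed form len(namber)//2.

-- ===== PORT A =====
def sashvalo (namber : List Int) : Int :=
  let st := (PySem.List.pyRange 0 ((namber.length : Int) + 1) 1).foldl
    (fun (p : Int × Int) i =>
      if PySem.Int.mod i 2 == 0 then (p.1 + i, p.2 + 1) else p) (0, 0)
  PySem.Int.floordiv st.1 st.2

-- ===== PORT B =====
def sashvalo_alt (namber : List Int) : Int :=
  PySem.Int.floordiv (namber.length : Int) 2

-- ===== PRECONDITION & SPEC =====
def Spec_sashvalo (namber : List Int) (out : Int) : Prop := out = sashvalo_alt namber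
instance (namber : List Int) (out : Int) : Decidable (Spec_sashvalo namber out) := by unfold Spec_sashvalo; infer_instance

-- ===== CLAIM (what is proved, stated in full; the proofs are below) =====
def Claim_equal_sashvalo : Prop := ∀ (namber : List Int), Dom_sashvalo namber → Spec_sashvalo namber (sashvalo namber)

-- ===== LEMMAS AND PROOFS =====

-- The loop over range(0, n) ends in state (c*(c-1), c) with c = (n+1)/2 evens below n.
theorem sashvalo_fold (n : Nat) :
    (PySem.List.pyRange 0 (n : Int) 1).foldl
      (fun (p : Int × Int) i =>
        if PySem.Int.mod i 2 == 0 then (p.1 + i, p.2 + 1) else p) (0, 0)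
    = ((((n + 1) / 2 * ((n + 1) / 2 - 1) : Nat) : Int), (((n + 1) / 2 : Nat) : Int)) := by
  induction n with
  | zero => simp
  | succ n ih =>
    rw [show ((n + 1 : Nat) : Int) = (n : Int) + 1 by push_cast; ring,
        PySem.List.pyRange_one_succ_right (by positivity),
        List.foldl_append, ih]
    simp only [List.foldl_cons, List.foldl_nil]
    have hm : PySem.Int.mod (n : Int) 2 = ((n % 2 : Nat) : Int) := by
      rw [PySem.Int.mod_eq_emod_of_pos (by norm_num)]; push_cast; rfl
    rcases Nat.even_or_odd n with he | ho
    · have h2 : n % 2 = 0 := Nat.even_iff.mp he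
      rw [hm, h2]
      simp only [Nat.cast_zero, beq_self_eq_true, if_true]
      have hk : n = 2 * (n / 2) := by omega
      have hc : (n + 1) / 2 = n / 2 := by omega
      have hc' : (n + 1 + 1) / 2 = n / 2 + 1 := by omega
      have hsum : n / 2 * (n / 2 - 1) + n = (n / 2 + 1) * (n / 2 + 1 - 1) := by
        obtain ⟨s, rfl⟩ : ∃ s, n = 2 * s := ⟨n / 2, hk⟩
        rw [Nat.mul_div_cancel_left _ (by norm_num)]
        cases s with
        | zero => rfl
        | succ t =>
          simp only [Nat.succ_sub_one]
          ring
      refine Prod.ext ?_ ?_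
      · show ((((n + 1) / 2 * ((n + 1) / 2 - 1) : Nat)) : Int) + (n : Int)
            = (((n + 1 + 1) / 2 * ((n + 1 + 1) / 2 - 1) : Nat) : Int)
        rw [hc, hc']
        exact_mod_cast congrArg (fun m : Nat => (m : Int)) hsum
      · show (((n + 1) / 2 : Nat) : Int) + 1 = (((n + 1 + 1) / 2 : Nat) : Int)
        rw [hc, hc']
        push_cast
        ring
    · have h2 : n % 2 = 1 := Nat.odd_iff.mp ho
      rw [hm, h2]
      rw [if_neg (by decide)]
      rw [show (n + 1 + 1) / 2 = (n + 1) / 2 from by omega]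

-- ===== VERDICT (by name: the statement is the Claim_ definition above) =====
theorem sashvalo_spec : Claim_equal_sashvalo := by
  intro namber _
  unfold Spec_sashvalo sashvalo sashvalo_alt
  set L := namber.length with hL
  have := sashvalo_fold (L + 1)
  rw [show ((L : Int) + 1) = ((L + 1 : Nat) : Int) by push_cast; ring, this]
  have h1 : PySem.Int.floordiv (((L + 2) / 2 * ((L + 2) / 2 - 1) : Nat) : Int)
      (((L + 2) / 2 : Nat) : Int) = (((L + 2) / 2 * ((L + 2) / 2 - 1) / ((L + 2) / 2) : Nat) : Int) :=
    PySem.Int.floordiv_natCast _ _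
  have h2 : PySem.Int.floordiv ((L : Nat) : Int) 2 = ((L / 2 : Nat) : Int) := by
    exact_mod_cast PySem.Int.floordiv_natCast L 2
  simp only [show L + 1 + 1 = L + 2 from rfl] at *
  rw [h1, h2]
  congr 1
  have hc : 1 ≤ (L + 2) / 2 := by omega
  rw [Nat.mul_div_cancel_left _ (by omega)]
  omega
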